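-- pv_equiv track=rewrite | github.com/xu1998hz/SEScore2 | syn_data/final_data_construct.py | sen_construct
-- ===== SOURCE A (Python) =====
-- def sen_construct(locs_records, replaced_contents, words_ls):
--     new_words_ls = []
--     sorted_locs_cont = sorted(list(zip(locs_records, replaced_contents)))
--     if len(sorted_locs_cont) == 1:
--         new_words_ls += words_ls[:locs_records[0][0]]+replaced_contents+words_ls[locs_records[0][1]:]
--     else:
--         for cur_index, locs_content in enumerate(sorted_locs_cont):
--             locs_pair, content = locs_content[0], locs_content[1]
--             if cur_index == 0:
--                 new_words_ls += words_ls[:locs_pair[0]]+[content]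
--             elif cur_index == len(sorted_locs_cont)-1:
--                 new_words_ls += words_ls[sorted_locs_cont[cur_index-1][0][1]:locs_pair[0]]+[content]+words_ls[locs_pair[1]:]
--             else:
--                 new_words_ls += words_ls[sorted_locs_cont[cur_index-1][0][1]:locs_pair[0]]+[content]
--     return new_words_ls
-- ===== SOURCE B (Python) =====
-- def sen_construct(locs_records, replaced_contents, words_ls):
--     # Recursive descent over the sorted (span, content) pairs, building the
--     # result back-to-front; no enumerate, no indices, no boundary branches.
--     def go(prev, rest):
--         if not rest:
--             return words_ls[prev:]
--         (start, end), content = rest[0]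
--         return words_ls[prev:start] + [content] + go(end, rest[1:])
--     pairs = sorted(zip(locs_records, replaced_contents))
--     return go(0, pairs) if pairs else []
-- ===== Notes on version B (the rewrite author's own statement) =====
-- stated objective: simpler
-- what changed: B replaces A's index loop (enumerate with separate first/middle/last branches, a singleton special case, and back-indexing into the sorted list) by a structural recursion over the sorted pairs that builds the result back-to-front from the tail slice, threading only the previous span end.
-- intended difference: On inputs with exactly one location pair but two or more replacement strings, A's singleton branch splices the entire replaced_contents list into the gap while B inserts only the single content zipped with that location, matching A's one-replacement-per-location behaviour on every other input. — e.g. on sen_construct([(0, 1)], ["a", "b"], ["x", "y"]): A returns ["a", "b", "y"], B returns ["a", "y"]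
import Mathlib
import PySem

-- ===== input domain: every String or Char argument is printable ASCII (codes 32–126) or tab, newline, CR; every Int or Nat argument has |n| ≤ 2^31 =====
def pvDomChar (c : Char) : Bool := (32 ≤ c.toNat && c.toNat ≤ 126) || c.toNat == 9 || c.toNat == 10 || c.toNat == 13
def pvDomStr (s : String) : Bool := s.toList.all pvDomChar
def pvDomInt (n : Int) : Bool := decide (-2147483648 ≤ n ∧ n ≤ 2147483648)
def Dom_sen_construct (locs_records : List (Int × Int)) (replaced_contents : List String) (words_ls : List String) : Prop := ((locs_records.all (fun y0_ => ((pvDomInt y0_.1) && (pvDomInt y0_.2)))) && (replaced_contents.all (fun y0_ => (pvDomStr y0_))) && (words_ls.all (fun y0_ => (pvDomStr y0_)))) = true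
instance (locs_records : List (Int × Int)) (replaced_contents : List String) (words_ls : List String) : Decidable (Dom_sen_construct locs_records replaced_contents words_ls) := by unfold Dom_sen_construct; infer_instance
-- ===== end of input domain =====

-- B replaces A's enumerate-with-branches index loop by a structural recursion over the
-- sorted pairs building the result back-to-front (objective: simpler; same O(n log n) cost).

-- Python's tuple comparison on ((int, int), str) is the lexicographic order on the
-- three components; pvKey names it via Mathlib's Lex, shared by both ports' sorted.
def pvKey (p : (Int × Int) × String) : Lex (Int × Lex (Int × String)) :=
  toLex (p.1.1, toLex (p.1.2, p.2))

-- ===== PORT A =====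
def sen_construct (locs_records : List (Int × Int)) (replaced_contents : List String) (words_ls : List String) : List String :=
  let sorted_locs_cont := PySem.List.sorted (locs_records.zip replaced_contents) pvKey false
  if sorted_locs_cont.length == 1 then
    PySem.List.slice words_ls none (some (PySem.List.pyGetD locs_records 0 default).1)
      ++ replaced_contents
      ++ PySem.List.slice words_ls (some (PySem.List.pyGetD locs_records 0 default).2) none
  else
    (PySem.List.enumerate sorted_locs_cont 0).foldl (fun new_words_ls ic =>
      let cur_index := ic.1
      let locs_pair := ic.2.1
      let content := ic.2.2
      if cur_index == 0 then
        new_words_ls ++ PySem.List.slice words_ls none (some locs_pair.1) ++ [content]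
      else if cur_index == (sorted_locs_cont.length : Int) - 1 then
        new_words_ls
          ++ PySem.List.slice words_ls
              (some (PySem.List.pyGetD sorted_locs_cont (cur_index - 1) default).1.2)
              (some locs_pair.1)
          ++ [content]
          ++ PySem.List.slice words_ls (some locs_pair.2) none
      else
        new_words_ls
          ++ PySem.List.slice words_ls
              (some (PySem.List.pyGetD sorted_locs_cont (cur_index - 1) default).1.2)
              (some locs_pair.1)
          ++ [content]) []

-- ===== PORT B =====
-- Source B's inner recursive helper 'go(prev, rest)'
def pvGo (words_ls : List String) (prev : Int) : List ((Int × Int) × String) → List String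
  | [] => PySem.List.slice words_ls (some prev) none
  | p :: rest =>
      PySem.List.slice words_ls (some prev) (some p.1.1) ++ [p.2] ++ pvGo words_ls p.1.2 rest

def sen_construct_alt (locs_records : List (Int × Int)) (replaced_contents : List String) (words_ls : List String) : List String :=
  let pairs := PySem.List.sorted (locs_records.zip replaced_contents) pvKey false
  match pairs with
  | [] => []
  | _ => pvGo words_ls 0 pairs

-- ===== PRECONDITION & SPEC =====
-- On inputs with exactly one location pair but two or more replacement strings, A's
-- singleton branch splices the ENTIRE replaced_contents list into the gap, while B
-- inserts only the single content the zip pairs with that location — the intended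
-- one-replacement-per-location behaviour A itself shows on every other input.
def D_sen_construct (locs_records : List (Int × Int)) (replaced_contents : List String) (words_ls : List String) : Prop :=
  locs_records.length = 1 ∧ 2 ≤ replaced_contents.length
instance (locs_records : List (Int × Int)) (replaced_contents : List String) (words_ls : List String) : Decidable (D_sen_construct locs_records replaced_contents words_ls) := by unfold D_sen_construct; infer_instance

def Spec_sen_construct (locs_records : List (Int × Int)) (replaced_contents : List String) (words_ls : List String) (out : List String) : Prop := ¬ D_sen_construct locs_records replaced_contents words_ls → out = sen_construct_alt locs_records replaced_contents words_ls
instance (locs_records : List (Int × Int)) (replaced_contents : List String) (words_ls : List String) (out : List String) : Decidable (Spec_sen_construct locs_records replaced_contents words_ls out) := by unfold Spec_sen_construct; infer_instance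

def pvDiffWitness_sen_construct : (List (Int × Int)) × List String × List String :=
  ([(0, 1)], ["a", "b"], ["x", "y"])
def pvDiffWitnessOut_sen_construct : (List String) × (List String) :=
  (["a", "b", "y"], ["a", "y"])

-- ===== CLAIM (what is proved, stated in full; the proofs are below) =====
def Claim_unchanged_sen_construct : Prop := ∀ (locs_records : List (Int × Int)) (replaced_contents : List String) (words_ls : List String), Dom_sen_construct locs_records replaced_contents words_ls → Spec_sen_construct locs_records replaced_contents words_ls (sen_construct locs_records replaced_contents words_ls)
def Claim_changed_sen_construct : Prop := Dom_sen_construct (pvDiffWitness_sen_construct.1) (pvDiffWitness_sen_construct.2.1) (pvDiffWitness_sen_construct.2.2) ∧ D_sen_construct (pvDiffWitness_sen_construct.1) (pvDiffWitness_sen_construct.2.1) (pvDiffWitness_sen_construct.2.2) ∧ sen_construct (pvDiffWitness_sen_construct.1) (pvDiffWitness_sen_construct.2.1) (pvDiffWitness_sen_construct.2.2) = pvDiffWitnessOut_sen_construct.1 ∧ sen_construct_alt (pvDiffWitness_sen_construct.1) (pvDiffWitness_sen_construct.2.1) (pvDiffWitness_sen_construct.2.2) = pvDiffWitnessOut_sen_construct.2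 ∧ pvDiffWitnessOut_sen_construct.1 ≠ pvDiffWitnessOut_sen_construct.2
def Claim_exact_sen_construct : Prop := ∀ (locs_records : List (Int × Int)) (replaced_contents : List String) (words_ls : List String), Dom_sen_construct locs_records replaced_contents words_ls → D_sen_construct locs_records replaced_contents words_ls → sen_construct locs_records replaced_contents words_ls ≠ sen_construct_alt locs_records replaced_contents words_ls

-- ===== LEMMAS AND PROOFS =====

-- A's tail loop (indices ≥ 1), phrased over the suffix of the sorted list,
-- computes exactly B's recursion pvGo from the previous pair's end.
lemma pvA_loop (w : List String) (z : List ((Int × Int) × String)) :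
    ∀ (ps : List ((Int × Int) × String)) (j : Nat) (acc : List String),
      1 ≤ j → z.drop j = ps → ps ≠ [] →
      (PySem.List.enumerate ps (j : Int)).foldl (fun new_words_ls ic =>
        let cur_index := ic.1
        let locs_pair := ic.2.1
        let content := ic.2.2
        if cur_index == 0 then
          new_words_ls ++ PySem.List.slice w none (some locs_pair.1) ++ [content]
        else if cur_index == (z.length : Int) - 1 then
          new_words_ls
            ++ PySem.List.slice w
                (some (PySem.List.pyGetD z (cur_index - 1) default).1.2)
                (some locs_pair.1)
            ++ [content]
            ++ PySem.List.slice w (some locs_pair.2) none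
        else
          new_words_ls
            ++ PySem.List.slice w
                (some (PySem.List.pyGetD z (cur_index - 1) default).1.2)
                (some locs_pair.1)
            ++ [content]) acc
        = acc ++ pvGo w ((z.getD (j - 1) default).1.2) ps := by
  intro ps
  induction ps with
  | nil => intro j acc _ _ hne; exact absurd rfl hne
  | cons p ps ih =>
    intro j acc hj hdrop _
    have hjz : j < z.length := by
      by_contra h
      have : z.drop j = [] := List.drop_eq_nil_of_le (by omega)
      rw [hdrop] at this; exact List.cons_ne_nil _ _ this
    have hfirst : z[j]? = some p := by
      have h0 : (z.drop j)[0]? = some p := by rw [hdrop]; rfl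
      rw [List.getElem?_drop] at h0
      simpa using h0
    have hcast : ((j : Int) - 1) = ((j - 1 : Nat) : Int) := by omega
    have hget : PySem.List.pyGetD z ((j : Int) - 1) default = z.getD (j - 1) default := by
      rw [hcast, PySem.List.pyGetD_natCast]
    have hlen : z.length = j + 1 + ps.length := by
      have h1 := congrArg List.length hdrop
      rw [List.length_drop] at h1
      simp at h1
      omega
    rw [PySem.List.enumerate_cons]
    simp only [List.foldl_cons]
    have hj0 : ((j : Int) == 0) = false := by
      simp only [beq_eq_false_iff_ne, ne_eq]
      omega
    cases ps with
    | nil =>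
      simp only [List.length_nil] at hlen
      have hlast : ((j : Int) == (z.length : Int) - 1) = true := by
        simp only [beq_iff_eq]
        omega
      simp only [hj0, hlast, if_true, Bool.false_eq_true, if_false]
      rw [PySem.List.enumerate_nil]
      simp only [List.foldl_nil, hget]
      simp [pvGo]
    | cons q qs =>
      simp only [List.length_cons] at hlen
      have hlast : ((j : Int) == (z.length : Int) - 1) = false := by
        simp only [beq_eq_false_iff_ne, ne_eq]
        omega
      simp only [hj0, hlast, Bool.false_eq_true, if_false]
      have hdrop' : z.drop (j + 1) = q :: qs := by
        have h2 : List.drop 1 (List.drop j z) = List.drop (j + 1) z := List.drop_drop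
        rw [hdrop] at h2
        simpa using h2.symm
      have hcast1 : ((j : Int) + 1) = ((j + 1 : Nat) : Int) := by omega
      rw [hcast1, ih (j + 1) _ (by omega) hdrop' (List.cons_ne_nil _ _)]
      have hgetj : z.getD (j + 1 - 1) default = p := by
        simp only [Nat.add_sub_cancel]
        simp [List.getD, hfirst]
      rw [hgetj, hget]
      simp [pvGo]

lemma pvSen_alt_cons (locs_records : List (Int × Int)) (replaced_contents : List String)
    (words_ls : List String) (p : (Int × Int) × String) (ps : List ((Int × Int) × String))
    (hz : PySem.List.sorted (locs_records.zip replaced_contents) pvKey false = p :: ps) :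
    sen_construct_alt locs_records replaced_contents words_ls
      = PySem.List.slice words_ls none (some p.1.1) ++ [p.2] ++ pvGo words_ls p.1.2 ps := by
  unfold sen_construct_alt
  rw [hz]
  simp [pvGo]

lemma pvSen_A_multi (locs_records : List (Int × Int)) (replaced_contents : List String)
    (words_ls : List String) (p q : (Int × Int) × String) (ps : List ((Int × Int) × String))
    (hz : PySem.List.sorted (locs_records.zip replaced_contents) pvKey false = p :: q :: ps) :
    sen_construct locs_records replaced_contents words_ls
      = PySem.List.slice words_ls none (some p.1.1) ++ [p.2] ++ pvGo words_ls p.1.2 (q :: ps) := by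
  unfold sen_construct
  rw [hz]
  have hlen1 : ((p :: q :: ps).length == 1) = false := by simp
  simp only [hlen1, Bool.false_eq_true, if_false]
  rw [PySem.List.enumerate_cons]
  simp only [List.foldl_cons]
  have h0 : ((0 : Int) == 0) = true := by decide
  simp only [h0, if_true]
  have h01 : ((0 : Int) + 1) = ((1 : Nat) : Int) := by norm_num
  rw [h01, pvA_loop words_ls (p :: q :: ps) (q :: ps) 1
    ([] ++ PySem.List.slice words_ls none (some p.1.1) ++ [p.2])
    (by omega) (by simp) (List.cons_ne_nil _ _)]
  simp [List.getD]

-- ===== VERDICT (by name: the statement is the Claim_ definition above) =====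
theorem sen_construct_spec : Claim_unchanged_sen_construct := by
  intro locs rc w _ hnD
  match hz : PySem.List.sorted (locs.zip rc) pvKey false with
  | [] =>
    simp [sen_construct, sen_construct_alt, hz, PySem.List.enumerate_nil]
  | [p] =>
    have hlen1 : (locs.zip rc).length = 1 := by
      have h := congrArg List.length hz
      rwa [PySem.List.length_sorted] at h
    match locs, rc, hlen1 with
    | (l :: ls), (c :: cs), hlen1 =>
      have hzip : ls.zip cs = [] := by
        rw [List.zip_cons_cons] at hlen1
        simp at hlen1
        rcases hlen1 with h | h <;> simp [h]
      have hzz : ((l :: ls).zip (c :: cs) : List ((Int × Int) × String)) = [(l, c)] := by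
        rw [List.zip_cons_cons, hzip]
      have hp : p = (l, c) := by
        rw [hzz] at hz
        have h1 : PySem.List.sorted [((l : Int × Int), (c : String))] pvKey false
            = [(l, c)] := rfl
        rw [h1] at hz
        simpa using hz.symm
      have hcs : cs = [] := by
        rcases ls with _ | ⟨l2, ls'⟩
        · by_contra hcs
          rcases cs with _ | ⟨c2, cs'⟩
          · exact hcs rfl
          · exact hnD ⟨by simp, by simp⟩
        · rcases cs with _ | ⟨c2, cs'⟩
          · rfl
          · simp [List.zip_cons_cons] at hzip
      subst hcs
      rw [pvSen_alt_cons (l :: ls) [c] w p [] hz]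
      unfold sen_construct
      rw [hzz] at hz ⊢
      have h1 : PySem.List.sorted [((l : Int × Int), (c : String))] pvKey false
          = [(l, c)] := rfl
      rw [h1]
      simp only [List.length_cons, List.length_nil]
      rw [hp]
      simp [pvGo, PySem.List.pyGetD_zero_cons]
  | (p :: q :: ps) =>
    rw [pvSen_A_multi locs rc w p q ps hz, pvSen_alt_cons locs rc w p (q :: ps) hz]

theorem sen_construct_changed : Claim_changed_sen_construct := by
  unfold Claim_changed_sen_construct; decide

theorem sen_construct_tight : Claim_exact_sen_construct := by
  intro locs rc w _ hD
  obtain ⟨h1, h2⟩ := hD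
  match locs, rc, h1, h2 with
  | [l], (c :: c2 :: cs), _, _ =>
    have hzip : ([l].zip (c :: c2 :: cs) : List ((Int × Int) × String)) = [(l, c)] := by
      simp [List.zip_cons_cons]
    have hz : PySem.List.sorted ([l].zip (c :: c2 :: cs)) pvKey false = [(l, c)] := by
      rw [hzip]; rfl
    rw [pvSen_alt_cons [l] (c :: c2 :: cs) w (l, c) [] hz]
    unfold sen_construct
    rw [hz]
    simp only [List.length_cons, List.length_nil]
    intro heq
    have hle := congrArg List.length heq
    simp [pvGo] at hle
    omega
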